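-- pv_equiv track=rewrite | github.com/seemanne/1PlanarTester | 1PlanarTester.py | checkLegalCrossings
-- ===== SOURCE A (Python) =====
-- def checkLegalCrossings(y, E):
--     S = set()
--     n = len(y)
--     for i in range(n):
--         if (y[i] == 1):
--             if (S.intersection({(E[i][0][0], E[i][0][1]), (E[i][1][0], E[i][1][1])}) == set()):
--                 S = S.union({(E[i][0][0], E[i][0][1]), (E[i][1][0], E[i][1][1])})
--             else: return False
--     return True
-- ===== SOURCE B (Python) =====
-- def checkLegalCrossings(y, E):
--     sets = []
--     for i, yi in enumerate(y):
--         if yi == 1: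
--             sets.append({(E[i][0][0], E[i][0][1]), (E[i][1][0], E[i][1][1])})
--     total = sum(len(s) for s in sets)
--     union = set().union(*sets)
--     return total == len(union)
-- ===== Notes on version B (the rewrite author's own statement) =====
-- stated objective: alternative
-- what changed: A's single early-exit scan that grows one accumulator set and aborts on the first overlap is replaced by a two-phase build-then-aggregate check: first collect the per-crossing deduplicated endpoint-pair sets, then compare the total of their sizes with the size of their global union (no early exit, no running accumulator test).
-- outside the precondition, e.g. on checkLegalCrossings([1, 1, 1], [((0, 0), (0, 1)), ((0, 0), (1, 1))]): A returns False, B raises IndexError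
import Mathlib
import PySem

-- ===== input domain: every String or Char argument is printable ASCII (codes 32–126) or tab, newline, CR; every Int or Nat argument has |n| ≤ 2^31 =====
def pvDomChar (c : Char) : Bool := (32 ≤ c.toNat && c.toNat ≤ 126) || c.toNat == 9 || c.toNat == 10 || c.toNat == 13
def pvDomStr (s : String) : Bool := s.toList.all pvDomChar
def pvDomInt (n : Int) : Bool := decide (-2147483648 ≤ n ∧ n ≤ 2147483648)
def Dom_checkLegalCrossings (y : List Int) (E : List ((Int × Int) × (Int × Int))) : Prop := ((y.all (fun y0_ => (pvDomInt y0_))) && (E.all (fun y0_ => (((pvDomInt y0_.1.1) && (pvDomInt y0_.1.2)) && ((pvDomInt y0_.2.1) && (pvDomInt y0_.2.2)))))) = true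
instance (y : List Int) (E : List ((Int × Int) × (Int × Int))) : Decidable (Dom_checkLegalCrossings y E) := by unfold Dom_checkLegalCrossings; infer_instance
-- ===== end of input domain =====

-- B replaces A's early-exit accumulating scan by a build-then-aggregate two-phase check
-- (collect per-crossing endpoint sets, then compare total size with union size); same cost,
-- different structure. Equivalence about the RETURN value on Pre_ (all selected indices have an edge).

-- ===== PORT A =====
-- the for-loop of A: walks the remaining y entries, i is the current index, S the accumulator set
def pvALoop (E : List ((Int × Int) × (Int × Int))) :
    List Int → Int → PySem.Set (Int × Int) → Bool
  | [], _, _ => true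
  | yi :: ys, i, S =>
    if yi == 1 then
      match PySem.List.pyGet? E i with
      | none => false   -- IndexError in Python; excluded by Pre_
      | some e =>
        let p : PySem.Set (Int × Int) := PySem.Set.ofList [(e.1.1, e.1.2), (e.2.1, e.2.2)]
        if PySem.Set.equal (PySem.Set.inter S p) PySem.Set.empty then
          pvALoop E ys (i + 1) (PySem.Set.union S p)
        else false
    else pvALoop E ys (i + 1) S

def checkLegalCrossings (y : List Int) (E : List ((Int × Int) × (Int × Int))) : Bool :=
  pvALoop E y 0 PySem.Set.empty

-- ===== PORT B =====
-- phase 1 of B: the list of per-crossing deduplicated endpoint-pair sets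
def pvCrossSets (y : List Int) (E : List ((Int × Int) × (Int × Int))) :
    List (PySem.Set (Int × Int)) :=
  (PySem.List.enumerate y).foldl
    (fun acc iy =>
      if iy.2 == 1 then
        let e := PySem.List.pyGetD E iy.1 ((0, 0), (0, 0))  -- default unreached under Pre_
        acc ++ [PySem.Set.ofList [(e.1.1, e.1.2), (e.2.1, e.2.2)]]
      else acc) []

def checkLegalCrossings_alt (y : List Int) (E : List ((Int × Int) × (Int × Int))) : Bool :=
  let sets := pvCrossSets y E
  let total := (sets.map List.length).sum
  let u := sets.foldl (fun acc s => PySem.Set.union acc s) PySem.Set.empty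
  total == u.length

-- ===== PRECONDITION & SPEC =====
-- Pre_ excludes inputs where some selected crossing (y[k] == 1) has no edge E[k]: there the
-- Python indexing raises IndexError (in A possibly masked by an earlier early `return False`).
def Pre_checkLegalCrossings (y : List Int) (E : List ((Int × Int) × (Int × Int))) : Prop :=
  ∀ k : Nat, (h : k < y.length) → y[k] = 1 → k < E.length
instance (y : List Int) (E : List ((Int × Int) × (Int × Int))) : Decidable (Pre_checkLegalCrossings y E) := by unfold Pre_checkLegalCrossings; infer_instance

def pvWitness_checkLegalCrossings : List Int × (List ((Int × Int) × (Int × Int))) :=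
  ([1, 0, 1], [((0, 0), (0, 1)), ((0, 0), (0, 0)), ((2, 2), (3, 3))])

def Spec_checkLegalCrossings (y : List Int) (E : List ((Int × Int) × (Int × Int))) (out : Bool) : Prop := out = checkLegalCrossings_alt y E
instance (y : List Int) (E : List ((Int × Int) × (Int × Int))) (out : Bool) : Decidable (Spec_checkLegalCrossings y E out) := by unfold Spec_checkLegalCrossings; infer_instance

-- ===== CLAIM (what is proved, stated in full; the proofs are below) =====
def Claim_equal_checkLegalCrossings : Prop := ∀ (y : List Int) (E : List ((Int × Int) × (Int × Int))), Dom_checkLegalCrossings y E → Pre_checkLegalCrossings y E → Spec_checkLegalCrossings y E (checkLegalCrossings y E)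

-- ===== LEMMAS AND PROOFS =====

-- the per-crossing set at (valid) index k
def pvMk (E : List ((Int × Int) × (Int × Int))) (i : Int) : PySem.Set (Int × Int) :=
  let e := PySem.List.pyGetD E i ((0, 0), (0, 0))
  PySem.Set.ofList [(e.1.1, e.1.2), (e.2.1, e.2.2)]

-- B's foldl-append loop is a filter-then-map
theorem pvCrossSets_eq (y : List Int) (E : List ((Int × Int) × (Int × Int))) :
    pvCrossSets y E =
      ((PySem.List.enumerate y).filter (fun iy => iy.2 == 1)).map (fun iy => pvMk E iy.1) := by
  unfold pvCrossSets
  have h : ∀ (l : List (Int × Int)) (acc : List (PySem.Set (Int × Int))),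
      l.foldl (fun acc iy =>
        if iy.2 == 1 then
          let e := PySem.List.pyGetD E iy.1 ((0, 0), (0, 0))
          acc ++ [PySem.Set.ofList [(e.1.1, e.1.2), (e.2.1, e.2.2)]]
        else acc) acc
      = acc ++ (l.filter (fun iy => iy.2 == 1)).map (fun iy => pvMk E iy.1) := by
    intro l
    induction l with
    | nil => simp
    | cons x xs ih =>
      intro acc
      cases hx : (x.2 == 1)
      · simp only [List.foldl_cons, List.filter_cons, hx, Bool.false_eq_true, if_false]
        rw [ih]
      · simp only [List.foldl_cons, List.filter_cons, hx, if_true, List.map_cons]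
        rw [ih]
        simp [pvMk]
  simpa using h (PySem.List.enumerate y) []

-- size bound for one union step
theorem pvLen_union_le {α : Type} [BEq α] [LawfulBEq α] (s t : List α) :
    (PySem.Set.union s t).length ≤ s.length + t.length := by
  have h1 : PySem.Set.union s t = PySem.Set.update s t := rfl
  rw [h1, PySem.Set.update_eq_append_filter]
  have h2 : ((PySem.Set.ofList t).filter (fun y => !(PySem.Set.contains s y))).length
      ≤ (PySem.Set.ofList t).length := List.length_filter_le _ _
  have h3 := PySem.Set.length_ofList_le (xs := t)
  simp only [List.length_append]
  omega

-- size bound for the whole union fold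
theorem pvLen_fold_le (l : List (PySem.Set (Int × Int))) :
    ∀ (T : PySem.Set (Int × Int)),
      (l.foldl (fun acc s => PySem.Set.union acc s) T).length ≤ T.length + (l.map List.length).sum := by
  induction l with
  | nil => intro T; simp
  | cons s rest ih =>
    intro T
    have h1 := ih (PySem.Set.union T s)
    have h2 := pvLen_union_le T s
    simp only [List.foldl_cons, List.map_cons, List.sum_cons]
    omega

-- disjoint union of sets adds lengths exactly
theorem pvLen_union_disjoint (S p : PySem.Set (Int × Int)) (hp : p.Nodup)
    (hd : ∀ x ∈ p, x ∉ S) :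
    (PySem.Set.union S p).length = S.length + p.length := by
  have h1 : PySem.Set.union S p = PySem.Set.update S p := rfl
  rw [h1, PySem.Set.update_eq_append_of_disjoint S p hp hd]
  simp

-- non-disjoint union of sets is strictly shorter than the sum
theorem pvLen_union_lt (S p : PySem.Set (Int × Int)) (hp : p.Nodup)
    (x : Int × Int) (hxS : x ∈ S) (hxp : x ∈ p) :
    (PySem.Set.union S p).length < S.length + p.length := by
  have h1 : PySem.Set.union S p = PySem.Set.update S p := rfl
  rw [h1, PySem.Set.update_eq_append_filter, PySem.Set.ofList_eq_self_of_nodup p hp]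
  have hlt : (p.filter (fun y => !(PySem.Set.contains S y))).length < p.length := by
    apply List.length_filter_lt_length_iff_exists.mpr
    exact ⟨x, hxp, by simp; exact hxS⟩
  simp only [List.length_append]
  omega

-- main loop invariant: A's loop from state S over the tail equals B's aggregate test
-- on the corresponding tail of crossing sets, shifted by S
theorem pvLoop_eq (E : List ((Int × Int) × (Int × Int))) :
    ∀ (ys : List Int) (i : Nat) (S : PySem.Set (Int × Int)), S.Nodup →
      (∀ k : Nat, (h : k < ys.length) → ys[k] = 1 → i + k < E.length) →
      pvALoop E ys (i : Int) S =
        (let l := ((PySem.List.enumerate ys (i : Int)).filter (fun iy => iy.2 == 1)).map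
            (fun iy => pvMk E iy.1)
         decide (S.length + (l.map List.length).sum =
           (l.foldl (fun acc s => PySem.Set.union acc s) S).length)) := by
  intro ys
  induction ys with
  | nil => intro i S _ _; simp [pvALoop, PySem.List.enumerate]
  | cons yi ys ih =>
    intro i S hS hpre
    have hpre' : ∀ k : Nat, (h : k < ys.length) → ys[k] = 1 → (i + 1) + k < E.length := by
      intro k hk hy
      have := hpre (k + 1) (by simpa using Nat.succ_lt_succ hk) (by simpa using hy)
      omega
    have hcast : ((i : Int) + 1) = ((i + 1 : Nat) : Int) := by push_cast; ring
    have henum : PySem.List.enumerate (yi :: ys) (i : Int)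
        = ((i : Int), yi) :: PySem.List.enumerate ys ((i : Int) + 1) :=
      PySem.List.enumerate_cons ..
    by_cases hyi : yi = 1
    · -- selected index
      have h1 : (yi == 1) = true := by simp [hyi]
      have hiE : i < E.length := by
        have := hpre 0 (by simp) (by simpa using hyi)
        omega
      obtain ⟨e, he⟩ : ∃ e, PySem.List.pyGet? E (i : Int) = some e := by
        simp [PySem.List.pyGet?, PySem.List.pyIdx?, hiE]
      have hmk : pvMk E (i : Int) = PySem.Set.ofList [(e.1.1, e.1.2), (e.2.1, e.2.2)] := by
        have hg : PySem.List.pyGetD E (i : Int) ((0, 0), (0, 0)) = e := by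
          simp [PySem.List.pyGetD, he]
        simp only [pvMk, hg]
      have hpnodup : (PySem.Set.ofList [(e.1.1, e.1.2), (e.2.1, e.2.2)]).Nodup :=
        PySem.Set.nodup_ofList _
      by_cases hdisj : PySem.Set.equal
          (PySem.Set.inter S (PySem.Set.ofList [(e.1.1, e.1.2), (e.2.1, e.2.2)]))
          PySem.Set.empty = true
      · -- disjoint: loop recurses with S ∪ p
        have hd : ∀ x ∈ PySem.Set.ofList [(e.1.1, e.1.2), (e.2.1, e.2.2)], x ∉ S := by
          intro x hxp hxS
          have h := (PySem.Set.equal_iff _ _).mp hdisj x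
          rw [PySem.Set.mem_inter] at h
          simp only [PySem.Set.empty, List.not_mem_nil, iff_false, not_and] at h
          exact h hxS hxp
        have hA : pvALoop E (yi :: ys) (i : Int) S
            = pvALoop E ys ((i : Int) + 1)
                (PySem.Set.union S (PySem.Set.ofList [(e.1.1, e.1.2), (e.2.1, e.2.2)])) := by
          simp only [pvALoop, h1, if_true, he, hdisj]
        rw [hA, hcast, ih (i + 1) _ (PySem.Set.nodup_union _ _ hS) hpre']
        have hlen := pvLen_union_disjoint S _ hpnodup hd
        simp only [henum, List.filter_cons, h1, if_true, List.map_cons,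
          List.foldl_cons, List.sum_cons, hmk, ← hcast]
        rw [decide_eq_decide]
        omega
      · -- overlap: loop returns False, and the aggregate count is strictly deficient
        have hA : pvALoop E (yi :: ys) (i : Int) S = false := by
          simp only [pvALoop, h1, if_true, he]
          rw [if_neg hdisj]
        obtain ⟨x, hxS, hxp⟩ :
            ∃ x, x ∈ S ∧ x ∈ PySem.Set.ofList [(e.1.1, e.1.2), (e.2.1, e.2.2)] := by
          by_contra hno
          push Not at hno
          apply hdisj
          apply (PySem.Set.equal_iff _ _).mpr
          intro z
          rw [PySem.Set.mem_inter]
          simp only [PySem.Set.empty, List.not_mem_nil, iff_false, not_and]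
          intro hzS hzp
          exact hno z hzS hzp
        have hlt := pvLen_union_lt S _ hpnodup x hxS hxp
        have hle := pvLen_fold_le
          (((PySem.List.enumerate ys ((i : Int) + 1)).filter (fun iy => iy.2 == 1)).map
            (fun iy => pvMk E iy.1))
          (PySem.Set.union S (PySem.Set.ofList [(e.1.1, e.1.2), (e.2.1, e.2.2)]))
        rw [hA]
        simp only [henum, List.filter_cons, h1, if_true, List.map_cons,
          List.foldl_cons, List.sum_cons, hmk]
        symm
        simp only [decide_eq_false_iff_not]
        omega
    · -- unselected index: loop skips, the crossing-set list is unchanged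
      have h0 : (yi == 1) = false := by simp [hyi]
      have hA : pvALoop E (yi :: ys) (i : Int) S = pvALoop E ys ((i : Int) + 1) S := by
        simp only [pvALoop, h0, Bool.false_eq_true, if_false]
      rw [hA, hcast, ih (i + 1) S hS hpre']
      simp only [henum, List.filter_cons, h0, Bool.false_eq_true, if_false, ← hcast]

-- ===== VERDICT (by name: the statement is the Claim_ definition above) =====
theorem checkLegalCrossings_spec : Claim_equal_checkLegalCrossings := by
  intro y E _ hpre
  unfold Spec_checkLegalCrossings checkLegalCrossings checkLegalCrossings_alt
  rw [pvCrossSets_eq]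
  have h := pvLoop_eq E y 0 PySem.Set.empty (by simp [PySem.Set.empty])
    (by intro k hk hy; simpa using hpre k hk hy)
  simp only [Nat.cast_zero] at h
  rw [h]
  simp [PySem.Set.empty, Bool.beq_eq_decide_eq]
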